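-- pv_equiv track=rewrite | github.com/isfahanUacm/UICPC | 2023/UICPC Regional/Round #12/solutions/exponial/per_py3.py | expo_mod_m
-- ===== SOURCE A (Python) =====
-- def phi(m):
--     res = 1
--     p = 2
--     while p*p <= m:
--         if m % p == 0:
--             res *= p-1
--             m //= p
--             while m % p == 0:
--                 res *= p
--                 m //= p
--         p += 1
--     if m > 1:
--         res *= m-1
--     return res
--
-- def expmod(b, e, m):
--     res = 1
--     while e:
--         if e % 2: res = (res * b) % m
--         e //= 2
--         b = (b*b) % m
--     return res
--
-- def expo_trunc(n):
--     return n if n < 3 else 9 if n == 3 else 99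
--
-- def expo_mod_m(n, m):
--     if m == 1: return 0
--     if n == 1: return 1
--     m2 = phi(m)
--     e = expo_trunc(n-1)
--     if e == 99:
--         e = m2 + expo_mod_m(n-1, m2)
--     return expmod(n, e, m)
-- ===== SOURCE B (Python) =====
-- def phi(m):
--     res = 1
--     p = 2
--     while p*p <= m:
--         if m % p == 0:
--             res *= p-1
--             m //= p
--             while m % p == 0:
--                 res *= p
--                 m //= p
--         p += 1
--     if m > 1:
--         res *= m-1
--     return res
--
-- def expo_trunc(n):
--     return n if n < 3 else 9 if n == 3 else 99
--
-- def expo_mod_m(n, m):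
--     # iterative: walk the totient tower down recording frames, then fold back up with builtin pow
--     chain = []
--     while m != 1 and n != 1 and expo_trunc(n - 1) == 99:
--         m2 = phi(m)
--         chain.append((n, m, m2))
--         n, m = n - 1, m2
--     if m == 1:
--         r = 0
--     elif n == 1:
--         r = 1
--     else:
--         r = pow(n, expo_trunc(n - 1), m)
--     for ln, lm, lm2 in reversed(chain):
--         r = pow(ln, lm2 + r, lm)
--     return r
-- ===== Notes on version B (the rewrite author's own statement) =====
-- stated objective: alternative
-- what changed: expo_mod_m is rewritten without recursion: a loop descends the totient tower recording (n, m, phi(m)) frames, then a reverse fold computes the result level by level with Python's builtin three-argument pow instead of the hand-written square-and-multiply expmod; phi and expo_trunc are kept.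
import Mathlib
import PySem

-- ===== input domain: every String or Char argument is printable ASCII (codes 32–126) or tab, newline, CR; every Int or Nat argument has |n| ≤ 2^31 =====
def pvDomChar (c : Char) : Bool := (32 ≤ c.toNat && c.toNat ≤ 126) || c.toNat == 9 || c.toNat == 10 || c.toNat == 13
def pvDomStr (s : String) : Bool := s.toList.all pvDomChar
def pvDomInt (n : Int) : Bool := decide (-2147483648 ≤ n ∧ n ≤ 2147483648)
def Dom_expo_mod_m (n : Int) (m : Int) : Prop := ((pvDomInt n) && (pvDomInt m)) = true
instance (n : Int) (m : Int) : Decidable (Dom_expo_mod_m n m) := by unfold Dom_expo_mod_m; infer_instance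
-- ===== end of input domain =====

-- ===== PORT A =====
-- B differs in decomposition: an iterative chain of totient-tower frames folded back up with
-- Python's builtin pow, instead of A's recursion with a hand-written square-and-multiply loop.
-- Loops are ported with a fuel argument; every fuel bound strictly exceeds the loop's iteration
-- count, so exhaustion is unreachable (a totality guard only).

-- inner while of phi: while m % p == 0: res *= p; m //= p
-- (the conjuncts 2 <= p and 0 < m are totality guards; every actual call satisfies them)
def phiInner : Nat → Int → Int → Int → Int × Int
  | 0, res, m, _ => (res, m)
  | fuel + 1, res, m, p =>
    if PySem.Int.mod m p = 0 ∧ 2 ≤ p ∧ 0 < m then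
      phiInner fuel (res * p) (PySem.Int.floordiv m p) p
    else (res, m)

-- outer while of phi (the conjunct 2 <= p is a totality guard; phi always starts at p = 2)
def phiLoop : Nat → Int → Int → Int → Int
  | 0, res, _, m => if 1 < m then res * (m - 1) else res
  | fuel + 1, res, p, m =>
    if p * p ≤ m ∧ 2 ≤ p then
      if PySem.Int.mod m p = 0 then
        let pr := phiInner (m.toNat + 1) (res * (p - 1)) (PySem.Int.floordiv m p) p
        phiLoop fuel pr.1 (p + 1) pr.2
      else phiLoop fuel res (p + 1) m
    else if 1 < m then res * (m - 1) else res

def phi (m : Int) : Int := phiLoop ((m - 2).toNat + 1) 1 2 m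

-- while e: of expmod (the guard 0 < e instead of e ≠ 0 is a totality guard: Python loops forever on e < 0)
def expmodLoop : Nat → Int → Int → Int → Int → Int
  | 0, res, _, _, _ => res
  | fuel + 1, res, b, e, m =>
    if 0 < e then
      expmodLoop fuel (if PySem.Int.mod e 2 ≠ 0 then PySem.Int.mod (res * b) m else res)
        (PySem.Int.mod (b * b) m) (PySem.Int.floordiv e 2) m
    else res

def expmod (b : Int) (e : Int) (m : Int) : Int := expmodLoop (e.toNat + 1) 1 b e m

def expo_trunc (n : Int) : Int := if n < 3 then n else if n = 3 then 9 else 99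

def expoGo : Nat → Int → Int → Int
  | 0, _, _ => 0
  | fuel + 1, n, m =>
    if m = 1 then 0
    else if n = 1 then 1
    else if expo_trunc (n - 1) = 99 then expmod n (phi m + expoGo fuel (n - 1) (phi m)) m
    else expmod n (expo_trunc (n - 1)) m

def expo_mod_m (n : Int) (m : Int) : Int := expoGo (n.toNat + 1) n m

-- ===== PORT B =====
-- the descending while loop of B, accumulating the chain of frames (n, m, phi m)
def descendGo : Nat → Int → Int → List (Int × Int × Int) → List (Int × Int × Int) × Int × Int
  | 0, n, m, chain => (chain, n, m)
  | fuel + 1, n, m, chain =>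
    if m ≠ 1 ∧ n ≠ 1 ∧ expo_trunc (n - 1) = 99 then
      descendGo fuel (n - 1) (phi m) (chain ++ [(n, m, phi m)])
    else (chain, n, m)

-- the if/elif/else computing the base value r in Source B
def towerBase (bn : Int) (bm : Int) : Int :=
  if bm = 1 then 0
  else if bn = 1 then 1
  else PySem.Int.powMod bn (expo_trunc (bn - 1)).toNat bm

def expo_mod_m_alt (n : Int) (m : Int) : Int :=
  ((descendGo (n.toNat + 1) n m []).1.reverse).foldl
    (fun r t => PySem.Int.powMod t.1 (t.2.2 + r).toNat t.2.1)
    (towerBase (descendGo (n.toNat + 1) n m []).2.1 (descendGo (n.toNat + 1) n m []).2.2)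

-- ===== PRECONDITION & SPEC =====
-- Pre_ = exactly the inputs where Python A returns: A raises ZeroDivisionError for n >= 2, m = 0,
-- and loops forever for n <= 0 with m != 1 (expmod with a negative exponent).
def Pre_expo_mod_m (n : Int) (m : Int) : Prop := m = 1 ∨ n = 1 ∨ (2 ≤ n ∧ m ≠ 0)
instance (n : Int) (m : Int) : Decidable (Pre_expo_mod_m n m) := by
  unfold Pre_expo_mod_m; infer_instance
def pvWitness_expo_mod_m : Int × Int := (6, 10)
def Spec_expo_mod_m (n : Int) (m : Int) (out : Int) : Prop := out = expo_mod_m_alt n m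
instance (n : Int) (m : Int) (out : Int) : Decidable (Spec_expo_mod_m n m out) := by unfold Spec_expo_mod_m; infer_instance

-- ===== CLAIM (what is proved, stated in full; the proofs are below) =====
def Claim_equal_expo_mod_m : Prop := ∀ (n : Int) (m : Int), Dom_expo_mod_m n m → Pre_expo_mod_m n m → Spec_expo_mod_m n m (expo_mod_m n m)

-- ===== LEMMAS AND PROOFS =====

theorem expo_trunc_of_eq_99 {k : Int} (h : expo_trunc k = 99) : 4 ≤ k := by
  unfold expo_trunc at h; split_ifs at h <;> omega

theorem expo_trunc_pos {k : Int} (h : 1 ≤ k) : 1 ≤ expo_trunc k := by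
  unfold expo_trunc; split_ifs <;> omega

-- x is congruent to its Python remainder modulo m
theorem pymod_dvd_sub (x m : Int) : m ∣ (x - PySem.Int.mod x m) := by
  have h := PySem.Int.floordiv_mul_add_mod x m
  exact ⟨PySem.Int.floordiv x m, by linarith⟩

-- congruent integers have the same Python remainder
theorem pymod_congr {u v m : Int} (hm : m ≠ 0) (h : m ∣ (u - v)) :
    PySem.Int.mod u m = PySem.Int.mod v m := by
  have hu := pymod_dvd_sub u m
  have hv := pymod_dvd_sub v m
  obtain ⟨k, hk⟩ : m ∣ (PySem.Int.mod u m - PySem.Int.mod v m) := by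
    have : PySem.Int.mod u m - PySem.Int.mod v m
        = (u - PySem.Int.mod u m) * (-1) + (v - PySem.Int.mod v m) + (u - v) := by ring
    rw [this]; exact dvd_add (dvd_add (Dvd.dvd.mul_right hu _) hv) h
  rcases lt_or_gt_of_ne hm with hneg | hpos
  · have h1 := PySem.Int.mod_neg_bounds (a := u) hneg
    have h2 := PySem.Int.mod_neg_bounds (a := v) hneg
    have hk0 : k = 0 := by nlinarith [hk]
    rw [hk0, mul_zero] at hk
    omega
  · have h1 := PySem.Int.mod_nonneg (a := u) hpos
    have h2 := PySem.Int.mod_lt (a := u) hpos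
    have h3 := PySem.Int.mod_nonneg (a := v) hpos
    have h4 := PySem.Int.mod_lt (a := v) hpos
    have hk0 : k = 0 := by nlinarith [hk]
    rw [hk0, mul_zero] at hk
    omega

theorem expmodLoop_zero (fuel : Nat) (res b m : Int) : expmodLoop fuel res b 0 m = res := by
  cases fuel <;> simp [expmodLoop]

theorem expmodLoop_eq (fuel : Nat) (res b e m : Int)
    (hf : e.toNat < fuel) (he : 1 ≤ e) (hm : m ≠ 0) :
    expmodLoop fuel res b e m = PySem.Int.mod (res * b ^ e.toNat) m := by
  induction fuel generalizing res b e with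
  | zero => omega
  | succ f ih =>
    rw [expmodLoop, if_pos (by omega)]
    have hsum := PySem.Int.floordiv_mul_add_mod e 2
    have hr0 := PySem.Int.mod_nonneg (a := e) (b := 2) (by omega)
    have hrlt := PySem.Int.mod_lt (a := e) (b := 2) (by omega)
    set e' := PySem.Int.floordiv e 2 with he'
    set r := PySem.Int.mod e 2 with hrdef
    by_cases hz : e' ≤ 0
    · -- then e = 1 (e = 2*e' + r, 0 ≤ r < 2, e ≥ 1 forces e' = 0, r = 1)
      have h0 : e' = 0 := by omega
      have he1 : e = 1 := by omega
      rw [h0, expmodLoop_zero, if_pos (show PySem.Int.mod e 2 ≠ 0 by omega), he1]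
      simp
    · have he'lt : e' < e := by
        rw [he', PySem.Int.floordiv_lt_iff_lt_mul (by omega)]; omega
      have hfin : e'.toNat < f := by omega
      rw [ih _ _ _ hfin (by omega)]
      apply pymod_congr hm
      -- exponent split: e.toNat = r.toNat + 2 * e'.toNat
      have hsplit : e.toNat = r.toNat + 2 * e'.toNat := by omega
      have hb' : m ∣ (PySem.Int.mod (b * b) m ^ e'.toNat - (b * b) ^ e'.toNat) := by
        have h1 : m ∣ (PySem.Int.mod (b * b) m - b * b) := by
          simpa [dvd_sub_comm] using pymod_dvd_sub (b * b) m
        exact dvd_trans h1 (sub_dvd_pow_sub_pow _ _ e'.toNat)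
      by_cases hodd : PySem.Int.mod e 2 ≠ 0
      · rw [if_pos hodd]
        have hr1 : r = 1 := by omega
        have hres : m ∣ (PySem.Int.mod (res * b) m - res * b) := by
          simpa [dvd_sub_comm] using pymod_dvd_sub (res * b) m
        have key : PySem.Int.mod (res * b) m * PySem.Int.mod (b * b) m ^ e'.toNat
              - res * b ^ e.toNat
            = (PySem.Int.mod (res * b) m - res * b) * PySem.Int.mod (b * b) m ^ e'.toNat
              + res * b * (PySem.Int.mod (b * b) m ^ e'.toNat - (b * b) ^ e'.toNat)
              + (res * b * (b * b) ^ e'.toNat - res * b ^ e.toNat) := by ring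
        rw [key]
        refine dvd_add (dvd_add (Dvd.dvd.mul_right hres _) (Dvd.dvd.mul_left hb' _)) ?_
        have : res * b * (b * b) ^ e'.toNat = res * b ^ e.toNat := by
          rw [hsplit, hr1]
          simp only [Int.toNat_one]
          ring
        rw [this]; simp
      · rw [if_neg hodd]
        rw [not_not] at hodd
        have hr00 : r = 0 := hodd
        have key : res * PySem.Int.mod (b * b) m ^ e'.toNat - res * b ^ e.toNat
            = res * (PySem.Int.mod (b * b) m ^ e'.toNat - (b * b) ^ e'.toNat)
              + (res * (b * b) ^ e'.toNat - res * b ^ e.toNat) := by ring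
        rw [key]
        refine dvd_add (Dvd.dvd.mul_left hb' _) ?_
        have : res * (b * b) ^ e'.toNat = res * b ^ e.toNat := by
          rw [hsplit, hr00]
          simp only [Int.toNat_zero]
          ring
        rw [this]; simp

theorem expmod_eq_powMod (b e m : Int) (he : 1 ≤ e) (hm : m ≠ 0) :
    expmod b e m = PySem.Int.powMod b e.toNat m := by
  rw [expmod, expmodLoop_eq _ _ _ _ _ (by omega) he hm, PySem.Int.powMod]
  simp

theorem phiInner_fst_pos (fuel : Nat) (res m p : Int) (h : 1 ≤ res) :
    1 ≤ (phiInner fuel res m p).1 := by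
  induction fuel generalizing res m with
  | zero => simpa [phiInner]
  | succ f ih =>
    rw [phiInner]
    split_ifs with hg
    · exact ih (res * p) _ (by nlinarith [hg.2.1])
    · simpa

theorem phiLoop_pos (fuel : Nat) (res p m : Int) (h : 1 ≤ res) : 1 ≤ phiLoop fuel res p m := by
  induction fuel generalizing res p m with
  | zero =>
    rw [phiLoop]; split_ifs with h1
    · nlinarith
    · exact h
  | succ f ih =>
    rw [phiLoop]
    split_ifs with hg hdvd h1
    · exact ih _ _ _ (phiInner_fst_pos _ _ _ _ (by nlinarith [hg.2]))
    · exact ih _ _ _ h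
    · nlinarith
    · exact h

theorem phi_pos (m : Int) : 1 ≤ phi m := phiLoop_pos _ _ _ _ le_rfl

theorem expmodLoop_nonneg (fuel : Nat) (res b e m : Int) (hm : 0 < m) (h : 0 ≤ res) :
    0 ≤ expmodLoop fuel res b e m := by
  induction fuel generalizing res b e with
  | zero => simpa [expmodLoop]
  | succ f ih =>
    rw [expmodLoop]
    split_ifs with hg hodd
    · exact ih _ _ _ (PySem.Int.mod_nonneg (a := res * b) hm)
    · exact ih _ _ _ h
    · exact h

theorem expoGo_nonneg (fuel : Nat) (n m : Int) (hm : 1 ≤ m) : 0 ≤ expoGo fuel n m := by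
  cases fuel with
  | zero => simp [expoGo]
  | succ f =>
    simp only [expoGo, expmod]
    split_ifs with h1 h2 h3
    · omega
    · omega
    · exact expmodLoop_nonneg _ _ _ _ _ (by omega) (by omega)
    · exact expmodLoop_nonneg _ _ _ _ _ (by omega) (by omega)

theorem descendGo_acc (fuel : Nat) (n m : Int) (chain : List (Int × Int × Int)) :
    descendGo fuel n m chain
      = (chain ++ (descendGo fuel n m []).1, (descendGo fuel n m []).2) := by
  induction fuel generalizing n m chain with
  | zero => simp [descendGo]
  | succ f ih =>
    rw [descendGo]
    conv_rhs => rw [descendGo]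
    split_ifs with hg
    · rw [ih (n - 1) (phi m) (chain ++ [(n, m, phi m)]),
          ih (n - 1) (phi m) ([] ++ [(n, m, phi m)])]
      simp
    · simp

theorem alt_step (n m : Int) (h : m ≠ 1 ∧ n ≠ 1 ∧ expo_trunc (n - 1) = 99) (hn1 : 1 ≤ n) :
    expo_mod_m_alt n m
      = PySem.Int.powMod n (phi m + expo_mod_m_alt (n - 1) (phi m)).toNat m := by
  have hfuel : n.toNat + 1 = ((n - 1).toNat + 1) + 1 := by omega
  simp only [expo_mod_m_alt]
  rw [hfuel, descendGo, if_pos h, descendGo_acc _ _ _ ([] ++ [(n, m, phi m)])]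
  simp [List.foldl_append]

theorem expoGo_eq_alt (fuel : Nat) (n m : Int) (hf : n.toNat < fuel)
    (hpre : Pre_expo_mod_m n m) : expoGo fuel n m = expo_mod_m_alt n m := by
  induction fuel generalizing n m with
  | zero => omega
  | succ f ih =>
    simp only [expoGo]
    by_cases hm : m = 1
    · rw [if_pos hm]
      simp [expo_mod_m_alt, descendGo, towerBase, hm]
    · rw [if_neg hm]
      by_cases hn : n = 1
      · rw [if_pos hn]
        simp [expo_mod_m_alt, descendGo, towerBase, hm, hn]
      · rw [if_neg hn]
        have hn2 : 2 ≤ n ∧ m ≠ 0 := by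
          rcases hpre with h | h | h
          · exact absurd h hm
          · exact absurd h hn
          · exact h
        by_cases he : expo_trunc (n - 1) = 99
        · rw [if_pos he]
          have hn5 : 5 ≤ n := by have := expo_trunc_of_eq_99 he; omega
          have hm2 : 1 ≤ phi m := phi_pos m
          have hx : 0 ≤ expoGo f (n - 1) (phi m) := expoGo_nonneg _ _ _ hm2
          -- A's recursive value equals B on the subproblem (inside Pre_)
          have hihe : expoGo f (n - 1) (phi m) = expo_mod_m_alt (n - 1) (phi m) :=
            ih (n - 1) (phi m) (by omega) (Or.inr (Or.inr ⟨by omega, by omega⟩))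
          rw [expmod_eq_powMod _ _ _ (by omega) hn2.2, hihe,
              ← alt_step n m ⟨hm, hn, he⟩ (by omega)]
        · rw [if_neg he]
          rw [expmod_eq_powMod _ _ _ (expo_trunc_pos (by omega)) hn2.2]
          simp [expo_mod_m_alt, descendGo, towerBase, hm, hn, he]

-- ===== VERDICT (by name: the statement is the Claim_ definition above) =====
theorem expo_mod_m_spec : Claim_equal_expo_mod_m := by
  intro n m _ hpre
  unfold Spec_expo_mod_m expo_mod_m
  exact expoGo_eq_alt _ n m (by omega) hpre
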